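-- pv_equiv track=rewrite | github.com/hikito-otikih/TensorTonic-Solutions | lag-features/lag-features.py | lag_features
-- ===== SOURCE A (Python) =====
-- def lag_features(series, lags):
--     """
--     Create a lag feature matrix from the time series.
--     """
--     # Write code here
--     # get max
--     max_lags = lags[0]
--     for lag in lags :
--         max_lags = max(max_lags, lag)
--     ans = []
--     for x in range(max_lags, len(series)) :
--         res = []
--         for y in lags:
--             res.append(series[x - y])
--         ans.append(res)
--     return ans
-- ===== SOURCE B (Python) =====
-- def lag_features(series, lags):
--     """
--     Create a lag feature matrix from the time series.
--     Column-wise build: one column per lag, then transpose to row-major.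
--     """
--     max_lag = max(lags)
--     n = len(series)
--     columns = [[series[x - y] for x in range(max_lag, n)] for y in lags]
--     return [list(row) for row in zip(*columns)]
-- ===== Notes on version B (the rewrite author's own statement) =====
-- stated objective: alternative
-- what changed: B builds one column per lag with a comprehension over the time index and then transposes the columns with zip(*columns), instead of A's row-by-row accumulation with a nested append loop per row.
import Mathlib
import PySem

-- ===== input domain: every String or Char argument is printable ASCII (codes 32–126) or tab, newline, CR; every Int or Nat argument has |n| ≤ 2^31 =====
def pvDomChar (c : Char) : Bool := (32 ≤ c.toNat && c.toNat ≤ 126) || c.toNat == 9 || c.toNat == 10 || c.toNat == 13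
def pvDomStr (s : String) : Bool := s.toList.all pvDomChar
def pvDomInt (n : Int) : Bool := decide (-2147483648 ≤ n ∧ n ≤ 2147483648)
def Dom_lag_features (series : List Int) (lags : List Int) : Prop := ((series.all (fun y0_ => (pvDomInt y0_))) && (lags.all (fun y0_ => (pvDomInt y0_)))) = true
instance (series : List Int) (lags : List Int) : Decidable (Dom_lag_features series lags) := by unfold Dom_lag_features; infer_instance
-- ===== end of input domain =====

-- B builds one column per lag and transposes them (zip) into row-major form, instead of
-- A's row-by-row accumulation with nested append loops; alternative decomposition, same cost.


-- ===== PORT A =====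
def lag_features (series : List Int) (lags : List Int) : List (List Int) :=
  -- max_lags = lags[0]; for lag in lags: max_lags = max(max_lags, lag)
  let max_lags := lags.foldl (fun m l => max m l) (PySem.List.pyGetD lags 0 0)
  -- ans = []; for x in range(max_lags, len(series)): res = []; for y in lags: res.append(series[x-y]); ans.append(res)
  (PySem.List.pyRange max_lags (series.length : Int) 1).foldl
    (fun ans x =>
      ans ++ [lags.foldl (fun res y => res ++ [PySem.List.pyGetD series (x - y) 0]) []]) []

-- ===== PORT B =====
-- zip(*columns) wrapped to lists: one row per index below the shortest column
def pyZipStar (cols : List (List Int)) : List (List Int) :=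
  let r := (PySem.List.min? (cols.map List.length) id).getD 0
  (List.range r).map (fun i => cols.map (fun c => c.getD i 0))

def lag_features_alt (series : List Int) (lags : List Int) : List (List Int) :=
  let m := (PySem.List.max? lags id).getD 0           -- max(lags)
  let n := (series.length : Int)
  let cols := lags.map (fun y =>
    (PySem.List.pyRange m n 1).map (fun x => PySem.List.pyGetD series (x - y) 0))
  pyZipStar cols

-- ===== PRECONDITION & SPEC =====
-- Pre_ excludes exactly the inputs on which the Python A raises: empty lags (IndexError at
-- lags[0]) and a negative lag while every lag is < len(series) (IndexError on series[x-y]).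
def Pre_lag_features (series : List Int) (lags : List Int) : Prop :=
  lags ≠ [] ∧ ((∀ y ∈ lags, y < (series.length : Int)) → ∀ y ∈ lags, 0 ≤ y)
instance (series : List Int) (lags : List Int) : Decidable (Pre_lag_features series lags) := by
  unfold Pre_lag_features; infer_instance

def pvWitness_lag_features : List Int × List Int := ([1, 2, 3], [1])

def Spec_lag_features (series : List Int) (lags : List Int) (out : List (List Int)) : Prop := out = lag_features_alt series lags
instance (series : List Int) (lags : List Int) (out : List (List Int)) : Decidable (Spec_lag_features series lags out) := by unfold Spec_lag_features; infer_instance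

-- ===== CLAIM (what is proved, stated in full; the proofs are below) =====
def Claim_equal_lag_features : Prop := ∀ (series : List Int) (lags : List Int), Dom_lag_features series lags → Pre_lag_features series lags → Spec_lag_features series lags (lag_features series lags)

-- ===== LEMMAS AND PROOFS =====

-- A's running-max fold over a nonempty list is what max? returns.
theorem max?_cons_cons (a x : Int) (xs : List Int) :
    PySem.List.max? (a :: x :: xs) (id : Int → Int)
      = PySem.List.max? (max a x :: xs) (id : Int → Int) := by
  simp only [PySem.List.max?, List.foldl_cons]
  congr 1
  simp only [id]
  split_ifs with h
  · rw [max_eq_right (le_of_lt h)]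
  · rw [max_eq_left (not_lt.mp h)]

theorem max?_eq_foldl_max (rest : List Int) (a : Int) :
    PySem.List.max? (a :: rest) (id : Int → Int)
      = some (rest.foldl (fun m l => max m l) a) := by
  induction rest generalizing a with
  | nil => rfl
  | cons x xs ih => rw [max?_cons_cons, ih, List.foldl_cons]

-- zip(*cols) row count: min? of a nonempty constant list of lengths is that constant.
theorem min?_replicate (k L : Nat) :
    PySem.List.min? (L :: List.replicate k L) (id : Nat → Nat) = some L := by
  induction k with
  | zero => rfl
  | succ k ih =>
    simp only [List.replicate_succ, PySem.List.min?, List.foldl_cons] at ih ⊢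
    simpa using ih

-- ===== VERDICT (by name: the statement is the Claim_ definition above) =====
theorem lag_features_spec : Claim_equal_lag_features := by
  intro series lags _ hpre
  obtain ⟨hne, -⟩ := hpre
  obtain ⟨a, rest, rfl⟩ : ∃ a rest, lags = a :: rest := by
    cases lags with
    | nil => exact absurd rfl hne
    | cons a rest => exact ⟨a, rest, rfl⟩
  unfold Spec_lag_features lag_features lag_features_alt pyZipStar
  simp only [PySem.List.foldl_append_singleton_eq_map, List.nil_append]
  rw [PySem.List.pyGetD_zero_cons]
  have hmax : (a :: rest).foldl (fun m l => max m l) a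
      = (PySem.List.max? (a :: rest) (id : Int → Int)).getD 0 := by
    rw [max?_eq_foldl_max]
    simp [List.foldl_cons, max_self]
  rw [hmax]
  set m := (PySem.List.max? (a :: rest) (id : Int → Int)).getD 0 with hm
  -- lengths of all columns are equal, so the row count is the common column length
  have hlen : ((a :: rest).map (fun y =>
        (PySem.List.pyRange m (series.length : Int) 1).map
          (fun x => PySem.List.pyGetD series (x - y) 0))).map List.length
      = ((series.length : Int) - m).toNat
          :: List.replicate rest.length ((series.length : Int) - m).toNat := by
    simp [List.map_map, Function.comp_def, PySem.List.length_pyRange_one, List.map_const']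
  rw [hlen, min?_replicate]
  simp only [Option.getD_some]
  rw [PySem.List.pyRange_one]
  rw [List.map_map]
  apply List.map_congr_left
  intro i hi
  rw [List.mem_range] at hi
  simp [Function.comp_def, List.map_map, hi]
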